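-- pv_equiv track=rewrite | github.com/macbre/sql-metadata | sql_metadata/_tables.py | _is_in_comma_list_after_keyword
-- ===== SOURCE A (Python) =====
-- _TABLE_CONTEXT_KEYWORDS = {"FROM", "JOIN", "TABLE", "INTO", "UPDATE"}
--
-- _INTERRUPTING_KEYWORDS = {"SELECT", "WHERE", "ORDER", "GROUP", "HAVING", "SET"}
--
-- def _is_in_comma_list_after_keyword(before: str) -> bool:
--     """Check whether a comma-preceded name belongs to a table list.
--
--     Looks for the most recent table-context keyword before the trailing
--     comma and verifies that no interrupting keyword (``SELECT``,
--     ``WHERE``, etc.) appears between that keyword and the comma.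
--
--     :param before: Upper-cased, right-stripped SQL text preceding the
--         name, already known to end with ``","``.
--     :type before: str
--     :returns: ``True`` if the name is part of a table list.
--     :rtype: bool
--     """
--     best_kw_pos = -1
--     for kw in _TABLE_CONTEXT_KEYWORDS:
--         kw_pos = before.rfind(kw)
--         if kw_pos > best_kw_pos:
--             best_kw_pos = kw_pos
--     if best_kw_pos < 0:
--         return False
--     between = before[best_kw_pos:]
--     return not any(ik in between for ik in _INTERRUPTING_KEYWORDS)
-- ===== SOURCE B (Python) =====
-- _TABLE_CONTEXT_KEYWORDS = {"FROM", "JOIN", "TABLE", "INTO", "UPDATE"}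
--
-- _INTERRUPTING_KEYWORDS = {"SELECT", "WHERE", "ORDER", "GROUP", "HAVING", "SET"}
--
--
-- def _is_in_comma_list_after_keyword(before: str) -> bool:
--     # Single right-to-left scan: the first (i.e. rightmost) position where any
--     # keyword of either class starts decides the answer.  The two classes begin
--     # with disjoint letters, so a position never starts keywords of both kinds.
--     for pos in range(len(before) - 1, -1, -1):
--         if any(before.startswith(kw, pos) for kw in _TABLE_CONTEXT_KEYWORDS):
--             return True
--         if any(before.startswith(ik, pos) for ik in _INTERRUPTING_KEYWORDS):
--             return False
--     return False
-- ===== Notes on version B (the rewrite author's own statement) =====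
-- stated objective: alternative
-- what changed: B replaces A's five independent rfind passes, the slice and the any()-substring scan with a single right-to-left scan over positions that exits at the rightmost position where any keyword of either class starts (the two classes begin with disjoint letters, so that position alone decides the answer).
import Mathlib
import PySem

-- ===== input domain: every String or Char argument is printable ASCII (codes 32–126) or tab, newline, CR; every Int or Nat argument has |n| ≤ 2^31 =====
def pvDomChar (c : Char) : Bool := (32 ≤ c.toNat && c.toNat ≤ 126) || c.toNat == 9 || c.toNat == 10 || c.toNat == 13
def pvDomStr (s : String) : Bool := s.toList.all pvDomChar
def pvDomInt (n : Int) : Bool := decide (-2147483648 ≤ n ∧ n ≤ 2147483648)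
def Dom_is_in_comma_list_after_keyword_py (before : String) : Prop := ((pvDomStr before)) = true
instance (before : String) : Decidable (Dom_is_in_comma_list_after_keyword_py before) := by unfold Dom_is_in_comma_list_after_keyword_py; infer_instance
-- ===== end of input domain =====

-- B replaces A's per-keyword rfind passes, slice and any()-substring scan by ONE
-- right-to-left scan over positions with early exit (alternative decomposition, same result).

-- the two module-level keyword sets (fixed order; both programs' results are order-independent)
def pvTableKws : List String := ["FROM", "JOIN", "TABLE", "INTO", "UPDATE"]
def pvInterruptKws : List String := ["SELECT", "WHERE", "ORDER", "GROUP", "HAVING", "SET"]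

-- ===== PORT A =====
def is_in_comma_list_after_keyword_py (before : String) : Bool :=
  let best_kw_pos := pvTableKws.foldl (fun best kw =>
    let kw_pos := PySem.Str.rfind before kw
    if kw_pos > best then kw_pos else best) (-1)
  if best_kw_pos < 0 then false
  else
    let between := PySem.Str.slice before (some best_kw_pos) none
    !(pvInterruptKws.any fun ik => PySem.Str.isIn ik between)

-- ===== PORT B =====
-- 'before.startswith(kw, pos)' (0 ≤ pos ≤ len) is exactly 'kw is a prefix of the characters from pos'
def pvTableAt (s : List Char) (p : Nat) : Bool :=
  pvTableKws.any fun kw => kw.toList.isPrefixOf (s.drop p)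

def pvIkAt (s : List Char) (p : Nat) : Bool :=
  pvInterruptKws.any fun ik => ik.toList.isPrefixOf (s.drop p)

-- Source B's loop 'for pos in range(len(before)-1, -1, -1)': k+1 means position k is next
def pvScan (s : List Char) : Nat → Bool
  | 0 => false
  | k + 1 =>
    if pvTableAt s k then true
    else if pvIkAt s k then false
    else pvScan s k

def is_in_comma_list_after_keyword_py_alt (before : String) : Bool :=
  pvScan before.toList before.toList.length

-- ===== PRECONDITION & SPEC =====
def Spec_is_in_comma_list_after_keyword_py (before : String) (out : Bool) : Prop := out = is_in_comma_list_after_keyword_py_alt before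
instance (before : String) (out : Bool) : Decidable (Spec_is_in_comma_list_after_keyword_py before out) := by unfold Spec_is_in_comma_list_after_keyword_py; infer_instance

-- ===== CLAIM (what is proved, stated in full; the proofs are below) =====
def Claim_equal_is_in_comma_list_after_keyword_py : Prop := ∀ (before : String), Dom_is_in_comma_list_after_keyword_py before → Spec_is_in_comma_list_after_keyword_py before (is_in_comma_list_after_keyword_py before)

-- ===== LEMMAS AND PROOFS =====

-- rfind.go s sub j is at least i whenever sub occurs at position i ≤ j
theorem pv_go_ge (s sub : List Char) (j i : Nat) (hi : i ≤ j) (h : sub <+: s.drop i) :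
    (i : Int) ≤ PySem.Chars.rfind.go s sub j := by
  induction j with
  | zero =>
    interval_cases i
    simp only [List.drop_zero] at h
    simp [PySem.Chars.rfind.go, List.isPrefixOf_iff_prefix, h]
  | succ j ih =>
    rw [show PySem.Chars.rfind.go s sub (j+1)
        = if sub.isPrefixOf (s.drop (j+1)) then ((j:Int)+1) else PySem.Chars.rfind.go s sub j
      from by simp [PySem.Chars.rfind.go]]
    rcases Nat.lt_or_ge i (j+1) with hlt | hge
    · have := ih (by omega)
      split
      · omega
      · exact this
    · have hij : i = j + 1 := by omega
      subst hij
      rw [← List.isPrefixOf_iff_prefix] at h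
      simp [h]

-- when nonnegative, rfind.go points at an occurrence of sub
theorem pv_go_mem (s sub : List Char) (j : Nat) (h : 0 ≤ PySem.Chars.rfind.go s sub j) :
    sub <+: s.drop (PySem.Chars.rfind.go s sub j).toNat := by
  induction j with
  | zero =>
    simp only [PySem.Chars.rfind.go] at h ⊢
    split at h
    · next hp =>
      rw [List.isPrefixOf_iff_prefix] at hp
      simp [hp]
    · omega
  | succ j ih =>
    rw [show PySem.Chars.rfind.go s sub (j+1)
        = if sub.isPrefixOf (s.drop (j+1)) then ((j:Int)+1) else PySem.Chars.rfind.go s sub j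
      from by simp [PySem.Chars.rfind.go]] at h ⊢
    by_cases hp : sub.isPrefixOf (s.drop (j+1))
    · rw [List.isPrefixOf_iff_prefix] at hp
      simp only [hp, if_pos, List.isPrefixOf_iff_prefix]
      simpa using hp
    · simp only [hp, Bool.false_eq_true, ite_false] at h ⊢
      exact ih h

-- the key characterisation: sub occurs in s.drop p iff rfind s sub ≥ p (sub nonempty)
theorem pv_rfind_ge_iff (s sub : List Char) (hsub : sub ≠ []) (p : Nat) :
    ((p : Int) ≤ PySem.Chars.rfind s sub) ↔ PySem.Chars.isIn sub (s.drop p) = true := by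
  rw [← PySem.Chars.exists_prefix_drop_iff_isIn]
  constructor
  · intro h
    have h0 : 0 ≤ PySem.Chars.rfind s sub := by omega
    have hm := pv_go_mem s sub s.length h0
    refine ⟨(PySem.Chars.rfind s sub).toNat - p, ?_⟩
    rw [List.drop_drop,
      show p + ((PySem.Chars.rfind s sub).toNat - p) = (PySem.Chars.rfind s sub).toNat by omega]
    exact hm
  · rintro ⟨q, hq⟩
    rw [List.drop_drop] at hq
    have hle : p + q ≤ s.length := by
      by_contra hgt
      rw [List.drop_eq_nil_of_le (by omega)] at hq
      exact hsub (List.prefix_nil.mp hq)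
    have := pv_go_ge s sub s.length (p + q) hle hq
    unfold PySem.Chars.rfind
    omega

-- string-level: 'ik in before[b:]' as a comparison against rfind
theorem pv_isIn_slice_iff (before ik : String) (b : Int) (hb : 0 ≤ b) (hik : ik.toList ≠ []) :
    PySem.Str.isIn ik (PySem.Str.slice before (some b) none)
      = decide (b ≤ PySem.Str.rfind before ik) := by
  rw [PySem.Str.isIn_eq, PySem.Str.toList_slice, PySem.Chars.slice_eq_listSlice,
    PySem.List.slice_from _ hb, PySem.Str.rfind_eq]
  have h2 := pv_rfind_ge_iff before.toList ik.toList hik b.toNat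
  rw [Int.toNat_of_nonneg hb] at h2
  by_cases hP : b ≤ PySem.Chars.rfind before.toList ik.toList
  · rw [decide_eq_true hP]
    exact h2.mp hP
  · rw [decide_eq_false hP, Bool.eq_false_iff]
    exact fun hc => hP (h2.mpr hc)

-- final boolean identity between A's negated any() and the comparison of maxima
theorem pv_final (M s1 s2 s3 s4 s5 s6 : Int) (hM : 0 ≤ M) :
    (!(decide (M ≤ s1) || (decide (M ≤ s2) || (decide (M ≤ s3) ||
        (decide (M ≤ s4) || (decide (M ≤ s5) || (decide (M ≤ s6) || false)))))))
      = decide (0 ≤ M ∧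
          max (max (max (max (max (max (-1) s1) s2) s3) s4) s5) s6 < M) := by
  have hmax : ∀ a b c : Int, (max a b < c) ↔ (a < c ∧ b < c) := fun a b c => max_lt_iff
  rw [Bool.eq_iff_iff]
  simp only [Bool.not_eq_true', Bool.or_eq_false_iff, decide_eq_false_iff_not,
    decide_eq_true_eq, hmax]
  norm_num
  constructor <;> intro h <;> omega

-- A's running-maximum step is max
theorem pv_if_gt_eq_max (b p : Int) : (if p > b then p else b) = max b p := by
  rw [max_def]; split_ifs <;> omega

-- bounded maximum of rfind.go over a keyword list (the quantity A's side reduces to)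
def pvGmax (L : List String) (s : List Char) (k : Nat) : Int :=
  (L.map fun w => PySem.Chars.rfind.go s w.toList k).foldl max (-1)

theorem pv_go_le (s sub : List Char) (j : Nat) : PySem.Chars.rfind.go s sub j ≤ (j : Int) := by
  induction j with
  | zero => simp only [PySem.Chars.rfind.go]; split <;> omega
  | succ j ih =>
    rw [show PySem.Chars.rfind.go s sub (j+1)
        = if sub.isPrefixOf (s.drop (j+1)) then ((j:Int)+1) else PySem.Chars.rfind.go s sub j
      from by simp [PySem.Chars.rfind.go]]
    split <;> omega

theorem pv_foldl_max_le (l : List Int) (a b : Int) (ha : a ≤ b) (hl : ∀ x ∈ l, x ≤ b) :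
    l.foldl max a ≤ b := by
  induction l generalizing a with
  | nil => simpa using ha
  | cons x xs ih =>
    simp only [List.foldl_cons]
    exact ih _ (by have := hl x (by simp); omega) (fun y hy => hl y (by simp [hy]))

theorem pv_init_le_foldl_max (l : List Int) (a : Int) : a ≤ l.foldl max a := by
  induction l generalizing a with
  | nil => simp
  | cons y ys ih =>
    simp only [List.foldl_cons]
    exact le_trans (le_max_left a y) (ih (max a y))

theorem pv_mem_le_foldl_max (l : List Int) (a x : Int) (hx : x ∈ l) : x ≤ l.foldl max a := by
  induction l generalizing a with
  | nil => simp at hx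
  | cons y ys ih =>
    simp only [List.foldl_cons]
    rcases List.mem_cons.mp hx with rfl | h2
    · exact le_trans (le_max_right a x) (pv_init_le_foldl_max ys _)
    · exact ih _ h2

theorem pvGmax_le (L : List String) (s : List Char) (k : Nat) : pvGmax L s k ≤ (k : Int) := by
  unfold pvGmax
  apply pv_foldl_max_le
  · omega
  · intro x hx
    simp only [List.mem_map] at hx
    obtain ⟨w, _, rfl⟩ := hx
    exact pv_go_le s w.toList k

-- step of the bounded maximum: a hit at position k+1 wins, otherwise nothing changes
theorem pvGmax_succ (L : List String) (s : List Char) (k : Nat) :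
    pvGmax L s (k+1)
      = if L.any (fun w => w.toList.isPrefixOf (s.drop (k+1))) then ((k : Int) + 1)
        else pvGmax L s k := by
  have hstep : ∀ w : String, PySem.Chars.rfind.go s w.toList (k+1)
      = if w.toList.isPrefixOf (s.drop (k+1)) then ((k:Int)+1) else PySem.Chars.rfind.go s w.toList k := by
    intro w; simp [PySem.Chars.rfind.go]
  split
  · next hany =>
    obtain ⟨w, hwL, hw⟩ := List.any_eq_true.mp hany
    apply le_antisymm
    · unfold pvGmax
      apply pv_foldl_max_le
      · omega
      · intro x hx
        simp only [List.mem_map] at hx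
        obtain ⟨u, _, rfl⟩ := hx
        exact pv_go_le s u.toList (k+1)
    · unfold pvGmax
      apply pv_mem_le_foldl_max
      refine List.mem_map.mpr ⟨w, hwL, ?_⟩
      rw [hstep w, if_pos hw]
  · next hany =>
    unfold pvGmax
    congr 1
    apply List.map_congr_left
    intro w hwL
    rw [hstep w, if_neg]
    intro hw
    exact hany (List.any_eq_true.mpr ⟨w, hwL, hw⟩)

-- at position 0 the bounded maximum is 0 on a hit and -1 otherwise
theorem pvGmax_zero (L : List String) (s : List Char) :
    pvGmax L s 0
      = if L.any (fun w => w.toList.isPrefixOf (s.drop 0)) then (0 : Int) else -1 := by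
  have hstep : ∀ w : String, PySem.Chars.rfind.go s w.toList 0
      = if w.toList.isPrefixOf (s.drop 0) then (0:Int) else -1 := by
    intro w; simp [PySem.Chars.rfind.go]
  split
  · next hany =>
    obtain ⟨w, hwL, hw⟩ := List.any_eq_true.mp hany
    apply le_antisymm
    · unfold pvGmax
      apply pv_foldl_max_le
      · omega
      · intro x hx
        simp only [List.mem_map] at hx
        obtain ⟨u, _, rfl⟩ := hx
        exact pv_go_le s u.toList 0
    · unfold pvGmax
      apply pv_mem_le_foldl_max
      refine List.mem_map.mpr ⟨w, hwL, ?_⟩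
      rw [hstep w, if_pos hw]
  · next hany =>
    unfold pvGmax
    rw [show (L.map fun w => PySem.Chars.rfind.go s w.toList 0) = L.map fun _ => (-1 : Int) from ?_]
    · induction L with
      | nil => simp
      | cons x xs ih => simp_all
    · apply List.map_congr_left
      intro w hwL
      rw [hstep w, if_neg]
      intro hw
      exact hany (List.any_eq_true.mpr ⟨w, hwL, hw⟩)

-- the same step facts phrased through the scan's position tests (definitional repackaging)
theorem pvGmaxT_succ (s : List Char) (k : Nat) :
    pvGmax pvTableKws s (k+1)
      = if pvTableAt s (k+1) then ((k : Int) + 1) else pvGmax pvTableKws s k := by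
  rw [pvGmax_succ]; rfl

theorem pvGmaxI_succ (s : List Char) (k : Nat) :
    pvGmax pvInterruptKws s (k+1)
      = if pvIkAt s (k+1) then ((k : Int) + 1) else pvGmax pvInterruptKws s k := by
  rw [pvGmax_succ]; rfl

theorem pvGmaxT_zero (s : List Char) :
    pvGmax pvTableKws s 0 = if pvTableAt s 0 then (0 : Int) else -1 := by
  rw [pvGmax_zero]; rfl

theorem pvGmaxI_zero (s : List Char) :
    pvGmax pvInterruptKws s 0 = if pvIkAt s 0 then (0 : Int) else -1 := by
  rw [pvGmax_zero]; rfl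

-- the two keyword classes start with disjoint letters, so they never match at the same position
theorem pv_no_tie (s : List Char) (p : Nat) (ht : pvTableAt s p = true) : pvIkAt s p = false := by
  unfold pvTableAt at ht
  unfold pvIkAt
  cases hd : s.drop p with
  | nil =>
    rw [hd] at ht
    simp [pvTableKws, show "FROM".toList = ['F','R','O','M'] from by decide,
      show "JOIN".toList = ['J','O','I','N'] from by decide,
      show "TABLE".toList = ['T','A','B','L','E'] from by decide,
      show "INTO".toList = ['I','N','T','O'] from by decide,
      show "UPDATE".toList = ['U','P','D','A','T','E'] from by decide] at ht
  | cons c r =>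
    rw [hd] at ht
    simp only [pvTableKws, pvInterruptKws, List.any_cons, List.any_nil, Bool.or_false,
      show "FROM".toList = ['F','R','O','M'] from by decide,
      show "JOIN".toList = ['J','O','I','N'] from by decide,
      show "TABLE".toList = ['T','A','B','L','E'] from by decide,
      show "INTO".toList = ['I','N','T','O'] from by decide,
      show "UPDATE".toList = ['U','P','D','A','T','E'] from by decide,
      show "SELECT".toList = ['S','E','L','E','C','T'] from by decide,
      show "WHERE".toList = ['W','H','E','R','E'] from by decide,
      show "ORDER".toList = ['O','R','D','E','R'] from by decide,
      show "GROUP".toList = ['G','R','O','U','P'] from by decide,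
      show "HAVING".toList = ['H','A','V','I','N','G'] from by decide,
      show "SET".toList = ['S','E','T'] from by decide,
      List.isPrefixOf, Bool.or_eq_true, Bool.and_eq_true, beq_iff_eq] at ht ⊢
    rcases ht with ⟨h, -⟩ | ⟨h, -⟩ | ⟨h, -⟩ | ⟨h, -⟩ | ⟨h, -⟩ <;> subst h <;> simp

-- the scan equals the comparison of the two bounded maxima
theorem pv_scan_eq (s : List Char) (k : Nat) :
    pvScan s (k + 1)
      = decide (0 ≤ pvGmax pvTableKws s k ∧ pvGmax pvInterruptKws s k < pvGmax pvTableKws s k) := by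
  induction k with
  | zero =>
    rw [show pvScan s 1 = if pvTableAt s 0 then true else if pvIkAt s 0 then false else pvScan s 0
        from rfl,
      pvGmaxT_zero, pvGmaxI_zero]
    by_cases ht : pvTableAt s 0 = true
    · have hi := pv_no_tie s 0 ht
      rw [if_pos ht, if_pos ht, if_neg (by simp [hi])]
      decide
    · rw [if_neg ht, if_neg ht]
      rcases Bool.eq_false_or_eq_true (pvIkAt s 0) with hi | hi <;> simp [hi, pvScan]
  | succ k ih =>
    rw [show pvScan s (k+2)
        = if pvTableAt s (k+1) then true else if pvIkAt s (k+1) then false else pvScan s (k+1)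
        from rfl,
      pvGmaxT_succ, pvGmaxI_succ]
    by_cases ht : pvTableAt s (k+1) = true
    · have hi := pv_no_tie s (k+1) ht
      rw [if_pos ht, if_pos ht, if_neg (by simp [hi])]
      have h1 := pvGmax_le pvInterruptKws s k
      rw [eq_comm, decide_eq_true_eq]
      constructor
      · omega
      · omega
    · rw [if_neg ht, if_neg ht]
      by_cases hik : pvIkAt s (k+1) = true
      · rw [if_pos hik, if_pos hik]
        have h1 := pvGmax_le pvTableKws s k
        rw [eq_comm, decide_eq_false_iff_not]
        omega
      · rw [if_neg hik, if_neg hik]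
        exact ih

-- at position = length nothing matches (keywords are nonempty), so the maximum stays put
theorem pvGmax_top (L : List String) (s : List Char) (k : Nat) (hk : s.length ≤ k + 1)
    (hne : ∀ w ∈ L, w.toList ≠ []) :
    pvGmax L s (k + 1) = pvGmax L s k := by
  rw [pvGmax_succ, if_neg]
  intro hany
  obtain ⟨w, hwL, hw⟩ := List.any_eq_true.mp hany
  rw [List.drop_eq_nil_of_le hk] at hw
  exact hne w hwL (List.isPrefixOf_iff_prefix.mp hw |> List.prefix_nil.mp)

-- A's value as the comparison of the two maxima bounded by the string length
theorem pv_A_eq (before : String) :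
    is_in_comma_list_after_keyword_py before
      = decide (0 ≤ pvGmax pvTableKws before.toList before.toList.length
          ∧ pvGmax pvInterruptKws before.toList before.toList.length
              < pvGmax pvTableKws before.toList before.toList.length) := by
  unfold is_in_comma_list_after_keyword_py
  simp only [pvTableKws, pvInterruptKws, List.foldl_cons, List.foldl_nil, List.any_cons,
    List.any_nil, pv_if_gt_eq_max]
  have hrf : ∀ kw : String, PySem.Str.rfind before kw
      = PySem.Chars.rfind.go before.toList kw.toList before.toList.length := by
    intro kw; rw [PySem.Str.rfind_eq]; rfl
  split
  · next hneg =>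
    rw [eq_comm, decide_eq_false_iff_not]
    simp only [pvGmax, List.map_cons, List.map_nil,
      List.foldl_cons, List.foldl_nil]
    simp only [hrf] at hneg
    omega
  · next hneg =>
    rw [pv_isIn_slice_iff before "SELECT" _ (not_lt.mp hneg) (by decide),
        pv_isIn_slice_iff before "WHERE" _ (not_lt.mp hneg) (by decide),
        pv_isIn_slice_iff before "ORDER" _ (not_lt.mp hneg) (by decide),
        pv_isIn_slice_iff before "GROUP" _ (not_lt.mp hneg) (by decide),
        pv_isIn_slice_iff before "HAVING" _ (not_lt.mp hneg) (by decide),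
        pv_isIn_slice_iff before "SET" _ (not_lt.mp hneg) (by decide)]
    rw [pv_final _ _ _ _ _ _ _ (not_lt.mp hneg)]
    simp only [pvGmax, List.map_cons, List.map_nil,
      List.foldl_cons, List.foldl_nil, hrf]
    rfl

-- ===== VERDICT (by name: the statement is the Claim_ definition above) =====
theorem is_in_comma_list_after_keyword_py_spec : Claim_equal_is_in_comma_list_after_keyword_py := by
  unfold Claim_equal_is_in_comma_list_after_keyword_py
  intro before _
  unfold Spec_is_in_comma_list_after_keyword_py
  unfold is_in_comma_list_after_keyword_py_alt
  rw [pv_A_eq]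
  cases hl : before.toList.length with
  | zero =>
    have hnil : before.toList = [] := List.length_eq_zero_iff.mp hl
    rw [hnil]
    decide
  | succ m =>
    have hle : before.toList.length ≤ m + 1 := by omega
    rw [pvGmax_top pvTableKws before.toList m hle (by decide),
      pvGmax_top pvInterruptKws before.toList m hle (by decide),
      eq_comm, pv_scan_eq]
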